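-- pv_equiv track=rewrite | github.com/Pabricka/advent_of_code_2018 | advent5.py | remaining_polymer
-- ===== SOURCE A (Python) =====
-- def remaining_polymer(string):
--
--     units = []
--     for c in string:
--         if c.isprintable():
--             units.append(c)
--
--     iterate = True
--     while iterate:
--         iterate = False
--
--         for i in range(len(units)-1):
--             if i < len(units)-1:
--                 if units[i].isupper():
--                     if units[i].lower() == units[i+1]:
--                         del units[i]
--                         del units[i]
--
--                         iterate = True
--                 else:
--                     if units[i].upper() == units[i+1]:
--                         del units[i]
--                         del units[i]
--                         iterate = True
--     return len(units)
-- ===== SOURCE B (Python) =====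
-- def remaining_polymer(string):
--     stack = []
--     for c in string:
--         if not c.isprintable():
--             continue
--         if stack and stack[-1].swapcase() == c:
--             stack.pop()
--         else:
--             stack.append(c)
--     return len(stack)
-- ===== Notes on version B (the rewrite author's own statement) =====
-- stated objective: faster
-- what changed: Replaces A's repeated full rescans with in-place pair deletion (while-loop over passes, del inside a stale range) by a single left-to-right pass over the string that keeps a stack and pops the top when it annihilates with the incoming unit.
import Mathlib
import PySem

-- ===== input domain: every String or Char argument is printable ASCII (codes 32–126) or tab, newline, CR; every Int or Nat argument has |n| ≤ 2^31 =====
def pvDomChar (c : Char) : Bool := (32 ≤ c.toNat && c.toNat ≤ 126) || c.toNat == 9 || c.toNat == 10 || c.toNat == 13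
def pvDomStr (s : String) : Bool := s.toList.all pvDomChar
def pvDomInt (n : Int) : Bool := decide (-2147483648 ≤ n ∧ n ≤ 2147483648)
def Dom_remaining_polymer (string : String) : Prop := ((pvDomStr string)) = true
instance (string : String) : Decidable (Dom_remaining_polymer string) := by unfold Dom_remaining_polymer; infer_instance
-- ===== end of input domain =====

-- B replaces A's repeated rescans with in-place pair deletion by a single stack pass; return values are proved equal.

-- ===== PORT A =====
-- c.isprintable(): exact on the domain's characters (printable ASCII 32..126; tab/newline/CR are not printable)
def pvIsPrintA (c : Char) : Bool := 32 ≤ c.toNat && c.toNat ≤ 126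

-- one iteration i of A's inner `for i in range(len(units)-1)` loop (state = (units, iterate))
def pvStepA (st : List Char × Bool) (i : Int) : List Char × Bool :=
  if i < (st.1.length : Int) - 1 then
    match PySem.List.pyGet? st.1 i, PySem.List.pyGet? st.1 (i + 1) with
    | some ci, some ci1 =>
      if PySem.Chars.isupper ci then
        if PySem.Chars.lowerChar ci == ci1 then
          ((st.1.eraseIdx i.toNat).eraseIdx i.toNat, true)   -- del units[i]; del units[i]  (0 ≤ i: i comes from range(...))
        else st
      else
        if PySem.Chars.upperChar ci == ci1 then
          ((st.1.eraseIdx i.toNat).eraseIdx i.toNat, true)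
        else st
    | _, _ => st   -- unreachable: the guard keeps both indices in range
  else st

-- one full pass of the inner for-loop (the range is computed once, from the length at pass start)
def pvPassA (units : List Char) : List Char × Bool :=
  (PySem.List.pyRange 0 ((units.length : Int) - 1) 1).foldl pvStepA (units, false)

lemma len_eraseIdx_le (u : List Char) (k : Nat) : (u.eraseIdx k).length ≤ u.length := by
  induction u generalizing k with
  | nil => simp
  | cons a u ih =>
    cases k with
    | zero => simp [List.eraseIdx]
    | succ k => simpa [List.eraseIdx] using ih k

-- each pvStepA either leaves the state unchanged or strictly shrinks units and sets the flag
lemma pvStepA_len (st : List Char × Bool) (i : Int) :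
    pvStepA st i = st ∨ ((pvStepA st i).1.length < st.1.length ∧ (pvStepA st i).2 = true) := by
  unfold pvStepA
  split
  · rename_i hg
    split
    · rename_i ci ci1 heq1 heq2
      have hin : PySem.Raise.InRange st.1.length i := by
        by_contra hno
        rw [(PySem.List.pyGet?_eq_none_iff (xs := st.1) (i := i)).mpr hno] at heq1
        simp at heq1
      have hb : -(st.1.length : Int) ≤ i ∧ i < (st.1.length : Int) := by
        simpa [PySem.Raise.InRange] using hin
      have hk : i.toNat < st.1.length := by omega
      have hlt : ((st.1.eraseIdx i.toNat).eraseIdx i.toNat).length < st.1.length := by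
        have h1 := List.length_eraseIdx_of_lt hk
        have h2 := len_eraseIdx_le (st.1.eraseIdx i.toNat) i.toNat
        omega
      split
      · split
        · exact Or.inr ⟨hlt, rfl⟩
        · exact Or.inl rfl
      · split
        · exact Or.inr ⟨hlt, rfl⟩
        · exact Or.inl rfl
    · exact Or.inl rfl
  · exact Or.inl rfl

lemma pvFold_dec (is : List Int) (u : List Char) (b : Bool) :
    (is.foldl pvStepA (u, b)).1.length ≤ u.length ∧
      ((is.foldl pvStepA (u, b)).2 = true → b = true ∨ (is.foldl pvStepA (u, b)).1.length < u.length) := by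
  induction is generalizing u b with
  | nil => simp
  | cons i is ih =>
    rcases pvStepA_len (u, b) i with he | ⟨h1, h2⟩
    · simpa [he] using ih u b
    · obtain ⟨g1, g2⟩ := ih (pvStepA (u, b) i).1 (pvStepA (u, b) i).2
      simp only [List.foldl_cons] at *
      constructor
      · calc (is.foldl pvStepA (pvStepA (u, b) i)).1.length
            = (is.foldl pvStepA ((pvStepA (u, b) i).1, (pvStepA (u, b) i).2)).1.length := by simp
          _ ≤ (pvStepA (u, b) i).1.length := g1
          _ ≤ u.length := le_of_lt h1
      · intro _
        right
        calc (is.foldl pvStepA (pvStepA (u, b) i)).1.length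
            = (is.foldl pvStepA ((pvStepA (u, b) i).1, (pvStepA (u, b) i).2)).1.length := by simp
          _ ≤ (pvStepA (u, b) i).1.length := g1
          _ < u.length := h1

-- A's `while iterate:` loop
def pvWhileA (units : List Char) : List Char :=
  let r := pvPassA units
  if r.2 = true then pvWhileA r.1 else r.1
termination_by units.length
decreasing_by
  rcases (pvFold_dec (PySem.List.pyRange 0 ((units.length : Int) - 1) 1) units false).2
      (by simpa [pvPassA] using (by assumption : (pvPassA units).2 = true)) with h | h
  · exact absurd h (by simp)
  · simpa [pvPassA] using h

def remaining_polymer (string : String) : Int :=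
  let units := string.toList.foldl (fun acc c => if pvIsPrintA c then acc ++ [c] else acc) ([] : List Char)
  ((pvWhileA units).length : Int)

-- ===== PORT B =====
def pvIsPrintB (c : Char) : Bool := 32 ≤ c.toNat && c.toNat ≤ 126   -- c.isprintable(), as above

-- c.swapcase() for a single character: exact on ASCII
def pvSwapB (c : Char) : Char :=
  if PySem.Chars.isupper c then Char.ofNat (c.toNat + 32)
  else if PySem.Chars.islower c then Char.ofNat (c.toNat - 32)
  else c

-- one loop iteration of B: skip non-printable, pop on annihilation, else push (head = top of stack)
def pvStackStep (stack : List Char) (c : Char) : List Char :=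
  if pvIsPrintB c then
    match stack with
    | t :: rest => if pvSwapB t == c then rest else c :: t :: rest
    | [] => [c]
  else stack

def remaining_polymer_alt (string : String) : Int :=
  ((string.toList.foldl pvStackStep ([] : List Char)).length : Int)

-- ===== PRECONDITION & SPEC =====
def Spec_remaining_polymer (string : String) (out : Int) : Prop := out = remaining_polymer_alt string
instance (string : String) (out : Int) : Decidable (Spec_remaining_polymer string out) := by unfold Spec_remaining_polymer; infer_instance

-- ===== CLAIM (what is proved, stated in full; the proofs are below) =====
def Claim_equal_remaining_polymer : Prop := ∀ (string : String), Dom_remaining_polymer string → Spec_remaining_polymer string (remaining_polymer string)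

-- ===== LEMMAS AND PROOFS =====

-- the annihilation relation: x reacts with the unit after it iff x.swapcase() == it
def rB (a b : Char) : Bool := pvSwapB a == b

-- B's core step, with the printable filter factored out
def sCore (s : List Char) (c : Char) : List Char :=
  match s with
  | t :: rest => if pvSwapB t == c then rest else c :: t :: rest
  | [] => [c]

def SB (u : List Char) : List Char := u.foldl sCore []

-- a stack is good if no element reacts with the one above it
def Good (s : List Char) : Prop := List.IsChain (fun a b => rB b a = false) s

-- a polymer is fully reacted if no adjacent pair reacts
def NF (u : List Char) : Prop := List.IsChain (fun a b => rB a b = false) u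

lemma char_le_toNat (a c : Char) : (a ≤ c) ↔ a.toNat ≤ c.toNat := by
  rw [Char.le_def, UInt32.le_iff_toNat_le]
  exact Iff.rfl

lemma char_toNat_ofNat (n : Nat) (h : n < 55296) : (Char.ofNat n).toNat = n := by
  rw [Char.toNat_ofNat, if_pos (Or.inl h)]

lemma isupper_eq (c : Char) : PySem.Chars.isupper c = (decide (65 ≤ c.toNat) && decide (c.toNat ≤ 90)) := by
  have hA : (65 : Nat) = 'A'.toNat := by decide
  have hZ : (90 : Nat) = 'Z'.toNat := by decide
  rw [hA, hZ]
  simp only [PySem.Chars.isupper, char_le_toNat]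

lemma islower_eq (c : Char) : PySem.Chars.islower c = (decide (97 ≤ c.toNat) && decide (c.toNat ≤ 122)) := by
  have ha : (97 : Nat) = 'a'.toNat := by decide
  have hz : (122 : Nat) = 'z'.toNat := by decide
  rw [ha, hz]
  simp only [PySem.Chars.islower, char_le_toNat]

lemma swap_invol (a : Char) : pvSwapB (pvSwapB a) = a := by
  by_cases hu : PySem.Chars.isupper a = true
  · have hb : 65 ≤ a.toNat ∧ a.toNat ≤ 90 := by
      rw [isupper_eq] at hu; simpa using hu
    have h1 : pvSwapB a = Char.ofNat (a.toNat + 32) := by simp [pvSwapB, hu]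
    have h2 : (pvSwapB a).toNat = a.toNat + 32 := by
      rw [h1, char_toNat_ofNat _ (by omega)]
    have hu2 : PySem.Chars.isupper (pvSwapB a) = false := by
      rw [isupper_eq]; simp [h2]; omega
    have hl2 : PySem.Chars.islower (pvSwapB a) = true := by
      rw [islower_eq]; simp [h2]; omega
    have hs : pvSwapB (pvSwapB a) = Char.ofNat ((pvSwapB a).toNat - 32) := by
      conv_lhs => rw [pvSwapB]
      rw [if_neg (by simp [hu2]), if_pos hl2]
    rw [hs, h2, show a.toNat + 32 - 32 = a.toNat by omega, Char.ofNat_toNat]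
  · by_cases hl : PySem.Chars.islower a = true
    · have hb : 97 ≤ a.toNat ∧ a.toNat ≤ 122 := by
        rw [islower_eq] at hl; simpa using hl
      have hu' : PySem.Chars.isupper a = false := by simpa using hu
      have h1 : pvSwapB a = Char.ofNat (a.toNat - 32) := by simp [pvSwapB, hu', hl]
      have h2 : (pvSwapB a).toNat = a.toNat - 32 := by
        rw [h1, char_toNat_ofNat _ (by omega)]
      have hu2 : PySem.Chars.isupper (pvSwapB a) = true := by
        rw [isupper_eq]; simp [h2]; omega
      have hs : pvSwapB (pvSwapB a) = Char.ofNat ((pvSwapB a).toNat + 32) := by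
        conv_lhs => rw [pvSwapB]
        rw [if_pos hu2]
      rw [hs, h2, show a.toNat - 32 + 32 = a.toNat by omega, Char.ofNat_toNat]
    · have hu' : PySem.Chars.isupper a = false := by simpa using hu
      have hl' : PySem.Chars.islower a = false := by simpa using hl
      have h1 : pvSwapB a = a := by simp [pvSwapB, hu', hl']
      rw [h1, h1]

lemma rB_mid {a b c : Char} (h1 : rB a b = true) (h2 : rB b c = true) : a = c := by
  have e1 : pvSwapB a = b := by simpa [rB] using h1
  have e2 : pvSwapB b = c := by simpa [rB] using h2
  rw [← e2, ← e1, swap_invol]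

lemma swap_eq_lower {c : Char} (h : PySem.Chars.isupper c = true) :
    pvSwapB c = PySem.Chars.lowerChar c := by
  simp [pvSwapB, PySem.Chars.lowerChar, h]

lemma swap_eq_upper {c : Char} (h : PySem.Chars.isupper c = false) :
    pvSwapB c = PySem.Chars.upperChar c := by
  simp [pvSwapB, PySem.Chars.upperChar, h]

lemma sCore_Good {s : List Char} (hs : Good s) (c : Char) : Good (sCore s c) := by
  cases s with
  | nil => exact List.isChain_singleton c
  | cons t rest =>
    by_cases h : pvSwapB t = c
    · simp only [sCore, beq_iff_eq, if_pos h]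
      exact hs.tail
    · simp only [sCore, beq_iff_eq, if_neg h]
      exact List.isChain_cons_cons.mpr ⟨by simp [rB, h], hs⟩

-- deleting an adjacent reacting pair anywhere does not change the resulting stack
lemma absorb {x y : Char} (hxy : rB x y = true) (post : List Char) :
    ∀ (pre s : List Char), Good s →
      (pre ++ x :: y :: post).foldl sCore s = (pre ++ post).foldl sCore s := by
  intro pre
  induction pre with
  | nil =>
    intro s hs
    simp only [List.nil_append, List.foldl_cons]
    have hx : pvSwapB x = y := by simpa [rB] using hxy
    suffices h : sCore (sCore s x) y = s by rw [h]
    cases s with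
    | nil => simp [sCore, hx]
    | cons t rest =>
      by_cases ht : pvSwapB t = x
      · have hty : t = y := rB_mid (by simp [rB, ht]) hxy
        simp only [sCore, beq_iff_eq, if_pos ht]
        cases rest with
        | nil => simp [hty]
        | cons r rest' =>
          have hrt : rB r t = false := (List.isChain_cons_cons.mp hs).1
          have : ¬ (pvSwapB r = y) := by
            rw [← hty]; simpa [rB] using hrt
          simp [this, hty]
      · simp [sCore, ht, hx]
  | cons a pre ih =>
    intro s hs
    simp only [List.cons_append, List.foldl_cons]
    exact ih (sCore s a) (sCore_Good hs a)

lemma erase2 (pre post : List Char) (x y : Char) :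
    (((pre ++ x :: y :: post).eraseIdx pre.length).eraseIdx pre.length) = pre ++ post := by
  induction pre with
  | nil => rfl
  | cons a pre ih => simpa using ih

lemma decomp (u : List Char) (k : Nat) (h : k + 1 < u.length) :
    u = u.take k ++ u[k] :: u[k + 1] :: u.drop (k + 2) := by
  conv_lhs => rw [← List.take_append_drop k u]
  congr 1
  rw [List.drop_eq_getElem_cons (by omega)]
  congr 1
  rw [show k + 1 + 1 = k + 2 from rfl] at *
  rw [List.drop_eq_getElem_cons (by omega)]

lemma SB_erase (u : List Char) (k : Nat) (h : k + 1 < u.length)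
    (hr : rB u[k] u[k + 1] = true) :
    SB ((u.eraseIdx k).eraseIdx k) = SB u := by
  have hd := decomp u k h
  have hlen : (u.take k).length = k := by rw [List.length_take]; omega
  have he : (u.eraseIdx k).eraseIdx k = u.take k ++ u.drop (k + 2) := by
    have h2 := erase2 (u.take k) (u.drop (k + 2)) u[k] u[k + 1]
    rw [hlen] at h2
    calc (u.eraseIdx k).eraseIdx k
        = ((u.take k ++ u[k] :: u[k + 1] :: u.drop (k + 2)).eraseIdx k).eraseIdx k := by rw [← hd]
      _ = u.take k ++ u.drop (k + 2) := h2
  unfold SB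
  rw [he]
  conv_rhs => rw [hd]
  exact (absorb hr (u.drop (k + 2)) (u.take k) [] List.isChain_nil).symm

lemma pyGet?_nat (u : List Char) (k : Nat) (hk : k < u.length) :
    PySem.List.pyGet? u (k : Int) = some u[k] := by
  rw [PySem.List.pyGet?_natCast]
  exact List.getElem?_eq_getElem hk

lemma pvStepA_SB (st : List Char × Bool) (i : Int) (hi : 0 ≤ i) :
    SB (pvStepA st i).1 = SB st.1 := by
  unfold pvStepA
  split
  · rename_i hg
    split
    · rename_i ci ci1 heq1 heq2
      have hk : i.toNat + 1 < st.1.length := by omega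
      have hi1 : ci = st.1[i.toNat] := by
        rw [show i = ((i.toNat : Nat) : Int) by omega, pyGet?_nat _ _ (by omega)] at heq1
        exact (Option.some.injEq _ _ ▸ heq1).symm
      have hi2 : ci1 = st.1[i.toNat + 1] := by
        rw [show i + 1 = ((i.toNat + 1 : Nat) : Int) by omega, pyGet?_nat _ _ hk] at heq2
        exact (Option.some.injEq _ _ ▸ heq2).symm
      split
      · rename_i hu
        split
        · rename_i hbe
          have hr : rB st.1[i.toNat] st.1[i.toNat + 1] = true := by
            rw [rB, ← hi1, ← hi2, swap_eq_lower hu]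
            exact hbe
          exact SB_erase st.1 i.toNat hk hr
        · rfl
      · rename_i hu
        split
        · rename_i hbe
          have hr : rB st.1[i.toNat] st.1[i.toNat + 1] = true := by
            rw [rB, ← hi1, ← hi2, swap_eq_upper (by simpa using hu)]
            exact hbe
          exact SB_erase st.1 i.toNat hk hr
        · rfl
    · rfl
  · rfl

lemma foldl_SB (is : List Int) (hpos : ∀ i ∈ is, 0 ≤ i) (u : List Char) (b : Bool) :
    SB ((is.foldl pvStepA (u, b)).1) = SB u := by
  induction is generalizing u b with
  | nil => rfl
  | cons i is ih =>
    have h1 := pvStepA_SB (u, b) i (hpos i (by simp))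
    have h2 := ih (fun j hj => hpos j (by simp [hj])) (pvStepA (u, b) i).1 (pvStepA (u, b) i).2
    simp only [List.foldl_cons]
    rw [show pvStepA (u, b) i = ((pvStepA (u, b) i).1, (pvStepA (u, b) i).2) from rfl]
    rw [h2, h1]

lemma foldl_snd_true (is : List Int) : ∀ st : List Char × Bool, st.2 = true →
    (is.foldl pvStepA st).2 = true := by
  induction is with
  | nil => intro st h; exact h
  | cons i is ih =>
    intro st h
    simp only [List.foldl_cons]
    apply ih
    rcases pvStepA_len st i with he | ⟨_, h2⟩
    · rw [he]; exact h
    · exact h2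

lemma foldl_false (is : List Int) : ∀ u : List Char, (is.foldl pvStepA (u, false)).2 = false →
    is.foldl pvStepA (u, false) = (u, false) ∧ ∀ i ∈ is, pvStepA (u, false) i = (u, false) := by
  induction is with
  | nil => intro u _; exact ⟨rfl, by simp⟩
  | cons i is ih =>
    intro u hf
    simp only [List.foldl_cons] at hf ⊢
    rcases pvStepA_len (u, false) i with he | ⟨_, h2⟩
    · rw [he] at hf ⊢
      obtain ⟨g1, g2⟩ := ih u hf
      refine ⟨g1, ?_⟩
      intro j hj
      rcases List.mem_cons.mp hj with rfl | hj
      · exact he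
      · exact g2 j hj
    · exfalso
      have := foldl_snd_true is (pvStepA (u, false) i) h2
      rw [hf] at this
      exact Bool.noConfusion this

lemma pvStepA_nat (u : List Char) (b : Bool) (k : Nat) (hk : k + 1 < u.length)
    (hr : rB u[k] u[k + 1] = true) :
    pvStepA (u, b) (k : Int) = ((u.eraseIdx k).eraseIdx k, true) := by
  unfold pvStepA
  rw [if_pos (by push_cast; omega)]
  have h1 : PySem.List.pyGet? u ((k : Nat) : Int) = some u[k] := pyGet?_nat u k (by omega)
  have h2 : PySem.List.pyGet? u (((k : Nat) : Int) + 1) = some u[k + 1] := by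
    rw [show ((k : Nat) : Int) + 1 = ((k + 1 : Nat) : Int) by omega]
    exact pyGet?_nat u (k + 1) hk
  rw [h1, h2]
  have hsw : pvSwapB u[k] = u[k + 1] := by simpa [rB] using hr
  have htn : ((k : Nat) : Int).toNat = k := by omega
  by_cases hu : PySem.Chars.isupper u[k] = true
  · have : PySem.Chars.lowerChar u[k] = u[k + 1] := by rw [← swap_eq_lower hu]; exact hsw
    simp [hu, this, htn]
  · have hu' : PySem.Chars.isupper u[k] = false := by simpa using hu
    have : PySem.Chars.upperChar u[k] = u[k + 1] := by rw [← swap_eq_upper hu']; exact hsw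
    simp [hu', this, htn]

lemma pass_false {u : List Char} (h : (pvPassA u).2 = false) : (pvPassA u).1 = u ∧ NF u := by
  unfold pvPassA at h ⊢
  obtain ⟨g1, g2⟩ := foldl_false _ u h
  refine ⟨by rw [g1], ?_⟩
  rw [NF, List.isChain_iff_getElem]
  intro k hk
  by_contra hr
  have hr' : rB u[k] u[k + 1] = true := by
    cases hb : rB u[k] u[k + 1]
    · exact absurd hb hr
    · rfl
  have hmem : ((k : Nat) : Int) ∈ PySem.List.pyRange 0 ((u.length : Int) - 1) 1 := by
    rw [PySem.List.mem_pyRange_one]; omega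
  have hid := g2 _ hmem
  rw [pvStepA_nat u false k hk hr'] at hid
  have := congrArg Prod.snd hid
  exact Bool.noConfusion this

lemma pvWhileA_props : ∀ (n : Nat) (u : List Char), u.length ≤ n →
    SB (pvWhileA u) = SB u ∧ NF (pvWhileA u) := by
  intro n
  induction n with
  | zero =>
    intro u hu
    have hnil : u = [] := by
      cases u with
      | nil => rfl
      | cons a u => simp at hu
    subst hnil
    have hp : pvPassA [] = ([], false) := by
      simp [pvPassA]
    rw [pvWhileA]
    simp [hp, NF]
  | succ n ih =>
    intro u hu
    rw [pvWhileA]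
    cases h2 : (pvPassA u).2 with
    | false =>
      obtain ⟨g1, g2⟩ := pass_false h2
      simp only [Bool.false_eq_true, if_false]
      exact ⟨by rw [g1], by rw [g1]; exact g2⟩
    | true =>
      have hdec : (pvPassA u).1.length < u.length := by
        rcases (pvFold_dec (PySem.List.pyRange 0 ((u.length : Int) - 1) 1) u false).2
            (by simpa [pvPassA] using h2) with h | h
        · exact absurd h (by simp)
        · simpa [pvPassA] using h
      obtain ⟨g1, g2⟩ := ih (pvPassA u).1 (by omega)
      have hSB : SB (pvPassA u).1 = SB u := by
        unfold pvPassA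
        exact foldl_SB _ (fun i hi => ((PySem.List.mem_pyRange_one).mp hi).1) u false
      simp only [if_true]
      exact ⟨by rw [g1, hSB], g2⟩

-- a fully reacted polymer passes through the stack unchanged
lemma sfold_NF : ∀ (u : List Char), NF u → ∀ s : List Char, Good s →
    (∀ t h, s.head? = some t → u.head? = some h → rB t h = false) →
    u.foldl sCore s = u.reverse ++ s := by
  intro u
  induction u with
  | nil => intro _ s _ _; simp
  | cons h tl ih =>
    intro hnf s hg hcompat
    simp only [List.foldl_cons]
    have hstep : sCore s h = h :: s := by
      cases s with
      | nil => simp [sCore]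
      | cons t rest =>
        have hth : rB t h = false := hcompat t h rfl rfl
        have : ¬ (pvSwapB t = h) := by simpa [rB] using hth
        simp [sCore, this]
    rw [hstep]
    have htail : NF tl := hnf.tail
    have hg' : Good (h :: s) := by
      cases s with
      | nil => exact List.isChain_singleton h
      | cons t rest => exact List.isChain_cons_cons.mpr ⟨hcompat t h rfl rfl, hg⟩
    have hcompat' : ∀ t' h', (h :: s).head? = some t' → tl.head? = some h' → rB t' h' = false := by
      intro t' h' ht' hh'
      cases tl with
      | nil => simp at hh'
      | cons h2 tl2 =>
        have e1 : h = t' := by simpa using ht'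
        have e2 : h2 = h' := by simpa using hh'
        rw [← e1, ← e2]
        exact (List.isChain_cons_cons.mp hnf).1
    rw [ih htail (h :: s) hg' hcompat']
    simp

lemma SB_of_NF {u : List Char} (hu : NF u) : SB u = u.reverse := by
  have := sfold_NF u hu [] List.isChain_nil (by intro t h ht _; simp at ht)
  simpa [SB] using this

lemma filterA (l : List Char) : ∀ acc : List Char,
    l.foldl (fun acc c => if pvIsPrintA c then acc ++ [c] else acc) acc = acc ++ l.filter pvIsPrintA := by
  induction l with
  | nil => simp
  | cons c l ih => intro acc; by_cases h : pvIsPrintA c <;> simp [h, ih]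

lemma filterB (l : List Char) : ∀ s : List Char,
    l.foldl pvStackStep s = (l.filter pvIsPrintB).foldl sCore s := by
  induction l with
  | nil => simp
  | cons c l ih =>
    intro s
    by_cases h : pvIsPrintB c
    · have : pvStackStep s c = sCore s c := by simp [pvStackStep, sCore, h]
      simp [h, this, ih]
    · have : pvStackStep s c = s := by simp [pvStackStep, h]
      simp [h, this, ih]

-- ===== VERDICT (by name: the statement is the Claim_ definition above) =====
theorem remaining_polymer_spec : Claim_equal_remaining_polymer := by
  intro s _
  unfold Spec_remaining_polymer remaining_polymer remaining_polymer_alt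
  rw [filterA, filterB, List.nil_append]
  have hpp : pvIsPrintA = pvIsPrintB := rfl
  rw [hpp]
  set F := s.toList.filter pvIsPrintB with hF
  obtain ⟨g1, g2⟩ := pvWhileA_props F.length F le_rfl
  have h1 : SB (pvWhileA F) = (pvWhileA F).reverse := SB_of_NF g2
  have hlen : (pvWhileA F).length = (SB F).length := by
    rw [← g1, h1, List.length_reverse]
  have hfin : ((pvWhileA F).length : Int) = ((F.foldl sCore []).length : Int) := by
    exact_mod_cast hlen
  exact hfin
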